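-- pv_equiv track=rewrite | github.com/urlanalyzer95/url-analyzer | app/server.py | has_suspicious_path
-- ===== SOURCE A (Python) =====
-- def has_suspicious_path(url):
--     suspicious_paths = ['login', 'verify', 'secure', 'account', 'banking', 'payment', 'update', 'confirm']
--     try:
--         path_parts = url.split('/')[3:]
--         for part in path_parts:
--             for word in suspicious_paths:
--                 if word in part.lower():
--                     return True
--     except:
--         pass
--     return False
-- ===== SOURCE B (Python) =====
-- def _after_slash(s):
--     # suffix of s after its first slash, or None if s has no slash
--     for i, ch in enumerate(s):
--         if ch == '/':
--             return s[i + 1:]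
--     return None
--
--
-- def has_suspicious_path(url):
--     try:
--         tail = url
--         for _ in range(3):
--             tail = _after_slash(tail)
--             if tail is None:
--                 return False
--         tail = tail.lower()
--     except Exception:
--         return False
--     return any(w in tail for w in
--                ('login', 'verify', 'secure', 'account', 'banking',
--                 'payment', 'update', 'confirm'))
-- ===== Notes on version B (the rewrite author's own statement) =====
-- stated objective: alternative
-- what changed: B never splits the URL: it skips past the third slash character-by-character to obtain the path suffix directly (returning False if fewer than three slashes exist) and scans that one lowercased suffix per keyword, replacing A's split-into-segments plus nested segment-by-keyword loop; sound because no keyword contains a slash.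
import Mathlib
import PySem

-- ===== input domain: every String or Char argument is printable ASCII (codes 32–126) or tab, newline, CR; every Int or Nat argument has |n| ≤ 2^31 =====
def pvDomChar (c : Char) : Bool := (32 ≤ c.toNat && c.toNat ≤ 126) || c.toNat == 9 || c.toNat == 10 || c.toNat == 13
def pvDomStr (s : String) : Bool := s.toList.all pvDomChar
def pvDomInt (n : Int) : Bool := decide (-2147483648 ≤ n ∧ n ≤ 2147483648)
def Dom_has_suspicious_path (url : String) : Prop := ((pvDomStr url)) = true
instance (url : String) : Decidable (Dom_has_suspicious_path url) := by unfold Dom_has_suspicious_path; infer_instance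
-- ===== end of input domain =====

-- B never splits the URL: it skips past the third slash char by char and scans that one lowered
-- suffix per keyword (correct because no keyword contains a slash); a different algorithm, not faster.

-- ===== PORT A =====
-- A: split on '/', drop the first 3 pieces, nested loop: for each part, for each word,
-- return True as soon as word ∈ part.lower() (early return = List.any ∘ List.any).
-- The try/except can only fire on a non-string argument, which the String type excludes.
def has_suspicious_path (url : String) : Bool :=
  let suspicious_paths : List (List Char) :=
    ["login".toList, "verify".toList, "secure".toList, "account".toList,
     "banking".toList, "payment".toList, "update".toList, "confirm".toList]
  let path_parts := PySem.List.slice (PySem.Chars.splitOn url.toList ['/']) (some 3) none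
  path_parts.any (fun part =>
    suspicious_paths.any (fun word => PySem.Chars.isIn word (PySem.Chars.lower part)))

-- ===== PORT B =====
-- _after_slash: scan s char by char; on the first '/' return the remaining suffix, else None.
def pvAfterSlash : List Char → Option (List Char)
  | [] => none
  | c :: cs => if c = '/' then some cs else pvAfterSlash cs

-- B: three _after_slash steps (False if any fails), lower the suffix, one any() over keywords.
def has_suspicious_path_alt (url : String) : Bool :=
  match pvAfterSlash url.toList with
  | none => false
  | some t1 =>
    match pvAfterSlash t1 with
    | none => false
    | some t2 =>
      match pvAfterSlash t2 with
      | none => false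
      | some t3 =>
        let tail := PySem.Chars.lower t3
        ["login".toList, "verify".toList, "secure".toList, "account".toList,
         "banking".toList, "payment".toList, "update".toList,
         "confirm".toList].any (fun w => PySem.Chars.isIn w tail)

-- ===== PRECONDITION & SPEC =====
def Spec_has_suspicious_path (url : String) (out : Bool) : Prop := out = has_suspicious_path_alt url
instance (url : String) (out : Bool) : Decidable (Spec_has_suspicious_path url out) := by unfold Spec_has_suspicious_path; infer_instance

-- ===== CLAIM =====
def Claim_equal_has_suspicious_path : Prop := ∀ (url : String), Dom_has_suspicious_path url → Spec_has_suspicious_path url (has_suspicious_path url)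

-- ===== LEMMAS AND PROOFS =====

-- Simple recursive characterisation of splitting on the single char '/'.
def pvSplit : List Char → List (List Char)
  | [] => [[]]
  | c :: rest =>
    if c = '/' then [] :: pvSplit rest
    else
      match pvSplit rest with
      | [] => [[c]]
      | p :: ps => (c :: p) :: ps

theorem pvSplit_ne_nil (s : List Char) : pvSplit s ≠ [] := by
  cases s with
  | nil => simp [pvSplit]
  | cons c rest =>
    simp only [pvSplit]
    split_ifs
    · simp
    · cases h : pvSplit rest <;> simp

theorem pv_go_eq : ∀ (fuel : Nat) (l cur : List Char) (acc : List (List Char)),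
    l.length < fuel →
    PySem.Chars.splitOn.go ['/'] fuel l cur acc
      = acc.reverse ++ (match pvSplit l with
          | [] => []
          | p :: ps => (cur.reverse ++ p) :: ps) := by
  intro fuel
  induction fuel with
  | zero => intro l cur acc h; omega
  | succ fuel ih =>
    intro l cur acc h
    cases l with
    | nil => simp [PySem.Chars.splitOn.go, pvSplit]
    | cons c rest =>
      by_cases hc : c = '/'
      · subst hc
        rw [show PySem.Chars.splitOn.go ['/'] (fuel+1) ('/' :: rest) cur acc
              = PySem.Chars.splitOn.go ['/'] fuel (List.drop 1 ('/' :: rest)) [] (cur.reverse :: acc) by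
            simp [PySem.Chars.splitOn.go, List.isPrefixOf]]
        rw [List.drop_one, List.tail_cons, ih rest [] (cur.reverse :: acc) (by simpa using Nat.lt_of_succ_lt_succ h)]
        obtain ⟨p, ps, hps⟩ : ∃ p ps, pvSplit rest = p :: ps := by
          cases hx : pvSplit rest with
          | nil => exact absurd hx (pvSplit_ne_nil rest)
          | cons p ps => exact ⟨p, ps, rfl⟩
        simp [pvSplit, hps]
      · rw [show PySem.Chars.splitOn.go ['/'] (fuel+1) (c :: rest) cur acc
              = PySem.Chars.splitOn.go ['/'] fuel rest (c :: cur) acc by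
            simp [PySem.Chars.splitOn.go, List.isPrefixOf,
                  show ('/' : Char) ≠ c from fun h => hc h.symm]]
        rw [ih rest (c :: cur) acc (by simpa using Nat.lt_of_succ_lt_succ h)]
        obtain ⟨p, ps, hps⟩ : ∃ p ps, pvSplit rest = p :: ps := by
          cases hx : pvSplit rest with
          | nil => exact absurd hx (pvSplit_ne_nil rest)
          | cons p ps => exact ⟨p, ps, rfl⟩
        simp [pvSplit, hc, hps]

theorem pv_splitOn_eq (s : List Char) : PySem.Chars.splitOn s ['/'] = pvSplit s := by
  rw [PySem.Chars.splitOn, pv_go_eq (s.length + 1) s [] [] (Nat.lt_succ_self _)]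
  obtain ⟨p, ps, hps⟩ : ∃ p ps, pvSplit s = p :: ps := by
    cases hx : pvSplit s with
    | nil => exact absurd hx (pvSplit_ne_nil s)
    | cons p ps => exact ⟨p, ps, rfl⟩
  simp [hps]

-- The tail of the split is the split of the suffix after the first '/'.
theorem pv_tail_split (s : List Char) :
    (pvSplit s).tail = (match pvAfterSlash s with
      | none => []
      | some t => pvSplit t) := by
  induction s with
  | nil => simp [pvSplit, pvAfterSlash]
  | cons c rest ih =>
    by_cases hc : c = '/'
    · subst hc; simp [pvSplit, pvAfterSlash]
    · simp only [pvSplit, pvAfterSlash, if_neg hc]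
      cases hx : pvSplit rest with
      | nil => exact absurd hx (pvSplit_ne_nil rest)
      | cons p ps => rw [← ih, hx]; simp

-- Joining the split with '/' recovers the string.
theorem pv_join_split (s : List Char) :
    PySem.Chars.join ['/'] (pvSplit s) = s := by
  induction s with
  | nil => simp [pvSplit, PySem.Chars.join_singleton]
  | cons c rest ih =>
    by_cases hc : c = '/'
    · subst hc
      rw [show pvSplit ('/' :: rest) = [] :: pvSplit rest by simp [pvSplit]]
      cases hx : pvSplit rest with
      | nil => exact absurd hx (pvSplit_ne_nil rest)
      | cons p ps =>
        rw [PySem.Chars.join_cons_cons, ← hx, ih]; simp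
    · simp only [pvSplit, if_neg hc]
      cases hx : pvSplit rest with
      | nil => exact absurd hx (pvSplit_ne_nil rest)
      | cons p ps =>
        cases ps with
        | nil =>
          rw [PySem.Chars.join_singleton]
          have := ih; rw [hx, PySem.Chars.join_singleton] at this
          simp [this]
        | cons q qs =>
          rw [PySem.Chars.join_cons_cons]
          have := ih; rw [hx, PySem.Chars.join_cons_cons] at this
          simp [← this]

-- If c does not occur in w, a prefix of yas ++ c :: ys that is w must already be a prefix of yas.
theorem pv_prefix_split {w : List Char} (c : Char) (hc : c ∉ w) :
    ∀ (yas : List Char) {ys : List Char}, w <+: yas ++ c :: ys → w <+: yas := by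
  induction w with
  | nil => intro _ _ _; exact List.nil_prefix
  | cons d w' ih =>
    intro yas ys h
    cases yas with
    | nil =>
      obtain ⟨t, ht⟩ := h
      simp at ht
      exact absurd (ht.1 ▸ List.mem_cons_self) hc
    | cons a as =>
      rw [List.cons_append, List.cons_prefix_cons] at h
      exact List.cons_prefix_cons.mpr ⟨h.1, ih (fun hm => hc (List.mem_cons_of_mem _ hm)) as h.2⟩

-- A nonempty w avoiding c is an infix of xs ++ c :: ys iff it is an infix of xs or of ys.
theorem pv_infix_split {w : List Char} (c : Char) (hc : c ∉ w) (hw : w ≠ []) :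
    ∀ (xs : List Char) {ys : List Char}, (w <:+: xs ++ c :: ys ↔ w <:+: xs ∨ w <:+: ys) := by
  intro xs ys
  induction xs with
  | nil =>
    simp only [List.nil_append]
    rw [List.infix_cons_iff]
    constructor
    · rintro (h | h)
      · exact absurd (List.prefix_nil.mp (pv_prefix_split c hc [] h)) hw
      · exact Or.inr h
    · rintro (h | h)
      · exact absurd ((List.infix_nil).mp h) hw
      · exact Or.inr h
  | cons x xs' ih =>
    rw [List.cons_append, List.infix_cons_iff, ih]
    constructor
    · rintro (h | h | h)
      · exact Or.inl (pv_prefix_split c hc (x :: xs') h).isInfix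
      · exact Or.inl (List.infix_cons_iff.mpr (Or.inr h))
      · exact Or.inr h
    · rintro (h | h)
      · rcases (List.infix_cons_iff).mp h with h1 | h1
        · exact Or.inl (h1.trans (List.prefix_append (x :: xs') (c :: ys)))
        · exact Or.inr (Or.inl h1)
      · exact Or.inr (Or.inr h)

-- lower distributes over a '/'-join ('/' is unchanged by lowering).
theorem pv_lower_join (rs : List (List Char)) :
    PySem.Chars.lower (PySem.Chars.join ['/'] rs)
      = PySem.Chars.join ['/'] (rs.map PySem.Chars.lower) := by
  induction rs with
  | nil => simp [PySem.Chars.join_nil, PySem.Chars.lower]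
  | cons p rest ih =>
    cases rest with
    | nil => simp [PySem.Chars.join_singleton]
    | cons q r =>
      rw [PySem.Chars.join_cons_cons, List.map_cons, List.map_cons,
          PySem.Chars.join_cons_cons, ← List.map_cons, ← ih]
      simp [PySem.Chars.lower, PySem.Chars.lowerChar]
      decide

-- A nonempty '/'-free w is an infix of the '/'-join iff it is an infix of some piece.
theorem pv_infix_join {w : List Char} (hw : w ≠ []) (hc : '/' ∉ w) (rs : List (List Char)) :
    (w <:+: PySem.Chars.join ['/'] rs ↔ ∃ r ∈ rs, w <:+: r) := by
  induction rs with
  | nil => simp [PySem.Chars.join_nil, List.infix_nil, hw]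
  | cons p rest ih =>
    cases rest with
    | nil => simp [PySem.Chars.join_singleton]
    | cons q r =>
      rw [PySem.Chars.join_cons_cons]
      have : p ++ ['/'] ++ PySem.Chars.join ['/'] (q :: r)
          = p ++ '/' :: PySem.Chars.join ['/'] (q :: r) := by simp
      rw [this, pv_infix_split '/' hc hw, ih]
      simp

def pvW : List (List Char) :=
  ["login".toList, "verify".toList, "secure".toList, "account".toList,
   "banking".toList, "payment".toList, "update".toList, "confirm".toList]

-- Scanning each part separately equals scanning the lowered '/'-join once
-- (every keyword is nonempty and contains no '/').
theorem pv_key (parts : List (List Char)) :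
    (parts.any fun part => pvW.any fun word => PySem.Chars.isIn word (PySem.Chars.lower part))
      = pvW.any fun word => PySem.Chars.isIn word (PySem.Chars.lower (PySem.Chars.join ['/'] parts)) := by
  have hW : ∀ w ∈ pvW, w ≠ [] ∧ '/' ∉ w := by decide
  rw [pv_lower_join, Bool.eq_iff_iff]
  simp only [List.any_eq_true, PySem.Chars.isIn_iff_infix]
  constructor
  · rintro ⟨p, hp, w, hwm, hinf⟩
    exact ⟨w, hwm, (pv_infix_join (hW w hwm).1 (hW w hwm).2 _).mpr
      ⟨PySem.Chars.lower p, List.mem_map_of_mem hp, hinf⟩⟩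
  · rintro ⟨w, hwm, hinf⟩
    obtain ⟨r, hr, h⟩ := (pv_infix_join (hW w hwm).1 (hW w hwm).2 _).mp hinf
    obtain ⟨p, hp, rfl⟩ := List.mem_map.mp hr
    exact ⟨p, hp, w, hwm, h⟩

-- drop k of the split, expressed via k pvAfterSlash steps.
theorem pv_drop_one (s : List Char) :
    (pvSplit s).drop 1 = (match pvAfterSlash s with
      | none => []
      | some t => pvSplit t) := by
  rw [List.drop_one, pv_tail_split]

-- ===== VERDICT =====
theorem has_suspicious_path_spec : Claim_equal_has_suspicious_path := by
  intro url _
  unfold Spec_has_suspicious_path has_suspicious_path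
  show (PySem.List.slice (PySem.Chars.splitOn url.toList ['/']) (some 3) none).any
        (fun part => pvW.any fun word => PySem.Chars.isIn word (PySem.Chars.lower part))
      = has_suspicious_path_alt url
  rw [PySem.List.slice_from (PySem.Chars.splitOn url.toList ['/']) (a := 3) (by norm_num),
      pv_splitOn_eq]
  show ((pvSplit url.toList).drop 3).any _ = _
  have h3 : (pvSplit url.toList).drop 3 = ((((pvSplit url.toList).drop 1).drop 1).drop 1) := by
    simp [List.drop_drop]
  rw [h3, pv_drop_one]
  unfold has_suspicious_path_alt
  cases h1 : pvAfterSlash url.toList with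
  | none => simp
  | some t1 =>
    rw [pv_drop_one]
    cases h2 : pvAfterSlash t1 with
    | none => simp [h2]
    | some t2 =>
      rw [pv_drop_one]
      cases h4 : pvAfterSlash t2 with
      | none => simp [h2, h4]
      | some t3 =>
        show (pvSplit t3).any (fun part => pvW.any fun word => PySem.Chars.isIn word (PySem.Chars.lower part)) = _
        rw [pv_key, pv_join_split]
        simp [h2, h4, pvW]
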